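-- pv_equiv track=rewrite | github.com/zaralger/foo | shamir_lib.py | hardcore_fractions
-- ===== SOURCE A (Python) =====
-- def hardcore_fractions(tfracts):
-- 	tA = []
-- 	tB = []
-- 	for k in tfracts:
-- 		tA += [k[0]]
-- 		tB += [k[1]]
--
-- 	num = 0
-- 	den = 1
-- 	for i in range(len(tfracts)):
-- 		tnum = tA[i]
-- 		for y in range(len(tfracts)):
-- 			if y != i:
-- 				tnum *= tB[y]
-- 				tnum = tnum
-- 		num += tnum
-- 		den *= tB[i]
-- 	return (num,den)
-- ===== SOURCE B (Python) =====
-- def hardcore_fractions(tfracts):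
--     nums = [k[0] for k in tfracts]
--     dens = [k[1] for k in tfracts]
--     pre = [1]
--     for b in dens:
--         pre.append(pre[-1] * b)
--     suf = [1]
--     for b in reversed(dens):
--         suf.append(suf[-1] * b)
--     suf.reverse()
--     num = sum(a * p * s for a, p, s in zip(nums, pre, suf[1:]))
--     return (num, pre[-1])
-- ===== Notes on version B (the rewrite author's own statement) =====
-- stated objective: faster
-- what changed: Replaced the quadratic per-term inner product over all other denominators by one linear pass building prefix and suffix denominator products, so each numerator term is a[i]*pre[i]*suf[i+1].
import Mathlib
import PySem

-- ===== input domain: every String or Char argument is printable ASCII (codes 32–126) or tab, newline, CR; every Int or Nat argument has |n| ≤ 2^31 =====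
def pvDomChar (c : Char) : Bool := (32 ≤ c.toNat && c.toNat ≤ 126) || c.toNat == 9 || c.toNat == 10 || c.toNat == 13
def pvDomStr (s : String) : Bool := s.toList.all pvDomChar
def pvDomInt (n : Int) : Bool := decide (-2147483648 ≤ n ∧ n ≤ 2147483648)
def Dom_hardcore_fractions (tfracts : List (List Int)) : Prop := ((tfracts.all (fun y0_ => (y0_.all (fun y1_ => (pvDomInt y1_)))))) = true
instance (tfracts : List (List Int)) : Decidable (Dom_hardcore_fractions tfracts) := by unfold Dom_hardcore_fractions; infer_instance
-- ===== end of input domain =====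

-- B replaces A's quadratic inner product over all other denominators by one linear
-- pass of prefix/suffix denominator products (objective: faster).

-- ===== PORT A =====
def hardcore_fractions (tfracts : List (List Int)) : List Int :=
  let tA : List Int := tfracts.foldl (fun acc k => acc ++ [PySem.List.pyGetD k 0 0]) []
  let tB : List Int := tfracts.foldl (fun acc k => acc ++ [PySem.List.pyGetD k 1 0]) []
  let r : Int × Int :=
    (PySem.List.pyRange 0 (tfracts.length : Int) 1).foldl
      (fun (s : Int × Int) i =>
        let tnum := (PySem.List.pyRange 0 (tfracts.length : Int) 1).foldl
          (fun tnum y => if y ≠ i then tnum * PySem.List.pyGetD tB y 0 else tnum)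
          (PySem.List.pyGetD tA i 0)
        (s.1 + tnum, s.2 * PySem.List.pyGetD tB i 0))
      (0, 1)
  [r.1, r.2]

-- ===== PORT B =====
def hardcore_fractions_alt (tfracts : List (List Int)) : List Int :=
  let nums : List Int := tfracts.map (fun k => PySem.List.pyGetD k 0 0)
  let dens : List Int := tfracts.map (fun k => PySem.List.pyGetD k 1 0)
  let pre : List Int := dens.foldl (fun acc b => acc ++ [PySem.List.pyGetD acc (-1) 0 * b]) [1]
  let suf : List Int :=
    (dens.reverse.foldl (fun acc b => acc ++ [PySem.List.pyGetD acc (-1) 0 * b]) [1]).reverse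
  let num : Int :=
    ((nums.zip (pre.zip (PySem.List.slice suf (some 1) none))).map
      (fun x => x.1 * x.2.1 * x.2.2)).sum
  [num, PySem.List.pyGetD pre (-1) 0]

-- ===== PRECONDITION & SPEC =====
-- Pre_ excludes exactly the inputs where some inner list has fewer than two
-- elements, on which Python A (k[0] / k[1]) raises IndexError.
def Pre_hardcore_fractions (tfracts : List (List Int)) : Prop :=
  ∀ k ∈ tfracts, 2 ≤ k.length
instance (tfracts : List (List Int)) : Decidable (Pre_hardcore_fractions tfracts) := by
  unfold Pre_hardcore_fractions; infer_instance
def pvWitness_hardcore_fractions : List (List Int) := [[1, 2], [3, 4], [-5, 6]]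

def Spec_hardcore_fractions (tfracts : List (List Int)) (out : List Int) : Prop := out = hardcore_fractions_alt tfracts
instance (tfracts : List (List Int)) (out : List Int) : Decidable (Spec_hardcore_fractions tfracts out) := by unfold Spec_hardcore_fractions; infer_instance

-- ===== CLAIM (what is proved, stated in full; the proofs are below) =====
def Claim_equal_hardcore_fractions : Prop := ∀ (tfracts : List (List Int)), Dom_hardcore_fractions tfracts → Pre_hardcore_fractions tfracts → Spec_hardcore_fractions tfracts (hardcore_fractions tfracts)

-- ===== LEMMAS AND PROOFS =====

/-- Running products: `scanMul x [b1,…,bn] = [x*b1, x*b1*b2, …]`. -/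
def scanMul (x : Int) : List Int → List Int
  | [] => []
  | b :: bs => (x * b) :: scanMul (x * b) bs

theorem length_scanMul (x : Int) (bs : List Int) : (scanMul x bs).length = bs.length := by
  induction bs generalizing x with
  | nil => rfl
  | cons b bs ih => simp [scanMul, ih]

theorem scanMul_getElem (bs : List Int) (x : Int) (k : Nat) (hk : k < bs.length) :
    (scanMul x bs)[k]'(by rw [length_scanMul]; exact hk) = x * (bs.take (k + 1)).prod := by
  induction bs generalizing x k with
  | nil => simp at hk
  | cons b bs ih =>
    cases k with
    | zero => simp [scanMul]
    | succ k =>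
      simp only [scanMul, List.getElem_cons_succ, List.take_succ_cons, List.prod_cons]
      rw [ih (x * b) k (by simpa using hk)]
      ring

theorem foldl_scan (bs : List Int) (acc : List Int) (h : acc ≠ []) :
    bs.foldl (fun acc b => acc ++ [PySem.List.pyGetD acc (-1) 0 * b]) acc
      = acc ++ scanMul (acc.getLast h) bs := by
  induction bs generalizing acc with
  | nil => simp [scanMul]
  | cons b bs ih =>
    simp only [List.foldl_cons]
    rw [PySem.List.pyGetD_neg_one (h := h)]
    rw [ih (acc ++ [acc.getLast h * b]) (by simp)]
    simp [scanMul]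

theorem foldl_pair (l : List Int) (f g : Int → Int) (n0 d0 : Int) :
    l.foldl (fun (s : Int × Int) i => (s.1 + f i, s.2 * g i)) (n0, d0)
      = (n0 + (l.map f).sum, d0 * (l.map g).prod) := by
  induction l generalizing n0 d0 with
  | nil => simp
  | cons a l ih => simp [ih, List.sum_cons, List.prod_cons]; constructor <;> ring

theorem foldl_if_mul_of_ne (i : Int) (g : Int → Int) (l : List Int) (init : Int)
    (hne : ∀ y ∈ l, y ≠ i) :
    l.foldl (fun t y => if y ≠ i then t * g y else t) init = init * (l.map g).prod := by
  induction l generalizing init with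
  | nil => simp
  | cons a l ih =>
    have ha : a ≠ i := hne a (by simp)
    simp only [List.foldl_cons, if_pos ha, List.map_cons, List.prod_cons]
    rw [ih (init * g a) (fun y hy => hne y (by simp [hy]))]
    ring

theorem range_map_getD_take (xs : List Int) (i : Nat) (d : Int) (hi : i ≤ xs.length) :
    (List.range i).map (fun k => xs.getD k d) = xs.take i := by
  apply List.ext_getElem
  · simp [hi]
  · intro k h1 h2
    simp only [List.getElem_map, List.getElem_range, List.getElem_take]
    rw [List.getD_eq_getElem xs d (by simp at h1; omega)]

theorem pre_getD (dens : List Int) (k : Nat) (hk : k ≤ dens.length) :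
    (1 :: scanMul 1 dens).getD k 0 = (dens.take k).prod := by
  cases k with
  | zero => simp
  | succ j =>
    have hj : j < dens.length := by omega
    simp only [List.getD_cons_succ]
    rw [List.getD_eq_getElem _ _ (by rw [length_scanMul]; exact hj)]
    rw [scanMul_getElem dens 1 j hj, one_mul]

theorem pre_getLast (dens : List Int) :
    (1 :: scanMul 1 dens).getLast (by simp) = dens.prod := by
  rw [List.getLast_eq_getElem]
  have hidx : (1 :: scanMul 1 dens).length - 1 = dens.length := by simp [length_scanMul]
  simp only [hidx]
  have h := pre_getD dens dens.length le_rfl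
  rw [List.getD_eq_getElem _ _ (by simp [length_scanMul])] at h
  rw [List.take_length] at h
  exact h

theorem suf_getD (dens : List Int) (j : Nat) (hj : j ≤ dens.length) :
    ((1 :: scanMul 1 dens.reverse).reverse).getD j 0 = (dens.drop j).prod := by
  have hlen : (1 :: scanMul 1 dens.reverse).length = dens.length + 1 := by
    simp [length_scanMul]
  rw [List.getD_eq_getElem _ _ (by simp [length_scanMul]; omega)]
  rw [List.getElem_reverse]
  by_cases h : j = dens.length
  · subst h
    have hidx : (1 :: scanMul 1 dens.reverse).length - 1 - dens.length = 0 := by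
      rw [hlen]; omega
    simp only [hidx, List.getElem_cons_zero]
    simp [List.drop_length]
  · have hjlt : j < dens.length := by omega
    have hidx : (1 :: scanMul 1 dens.reverse).length - 1 - j = (dens.length - 1 - j) + 1 := by
      rw [hlen]; omega
    simp only [hidx, List.getElem_cons_succ]
    rw [scanMul_getElem dens.reverse 1 (dens.length - 1 - j) (by simp; omega), one_mul]
    have h1 : dens.length - 1 - j + 1 = dens.length - j := by omega
    rw [h1, List.take_reverse]
    have h2 : dens.length - (dens.length - j) = j := by omega
    rw [h2, List.prod_reverse]

theorem tail_getD (l : List Int) (k : Nat) : l.tail.getD k 0 = l.getD (k + 1) 0 := by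
  cases l <;> simp

theorem zip3_map (as ps ss : List Int) (hp : as.length ≤ ps.length) (hs : as.length ≤ ss.length) :
    (as.zip (ps.zip ss)).map (fun x => x.1 * x.2.1 * x.2.2)
      = (List.range as.length).map (fun k => as.getD k 0 * ps.getD k 0 * ss.getD k 0) := by
  apply List.ext_getElem
  · simp; omega
  · intro k h1 h2
    have hk : k < as.length := by simpa using h2
    simp only [List.getElem_map, List.getElem_range, List.getElem_zip]
    rw [List.getD_eq_getElem _ _ hk, List.getD_eq_getElem _ _ (by omega),
      List.getD_eq_getElem _ _ (by omega)]

theorem A_term (tB : List Int) (k : Nat) (hk : k < tB.length) (init : Int) :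
    (PySem.List.pyRange 0 (tB.length : Int) 1).foldl
        (fun t y => if y ≠ (k : Int) then t * PySem.List.pyGetD tB y 0 else t) init
      = init * (tB.take k).prod * (tB.drop (k + 1)).prod := by
  rw [PySem.List.pyRange_one_append 0 (k : Int) (tB.length : Int) (by positivity)
    (by exact_mod_cast hk.le)]
  rw [PySem.List.pyRange_one_cons (show (k : Int) < (tB.length : Int) by exact_mod_cast hk)]
  have h1 : (PySem.List.pyRange 0 (k : Int) 1).map (fun y => PySem.List.pyGetD tB y 0)
      = tB.take k := by
    rw [PySem.List.pyRange_zero_nat k, List.map_map]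
    have hc : ((fun y => PySem.List.pyGetD tB y 0) ∘ fun (j : Nat) => (j : Int))
        = fun j => tB.getD j 0 := by
      funext j; simp [PySem.List.pyGetD_natCast]
    rw [hc, range_map_getD_take tB k 0 hk.le]
  have h2 : (PySem.List.pyRange ((k : Int) + 1) (tB.length : Int) 1).map
      (fun y => PySem.List.pyGetD tB y 0) = tB.drop (k + 1) := by
    have := PySem.List.map_pyGetD_pyRange' tB 0 (a := (k : Int) + 1) (by positivity)
    have ht : ((k : Int) + 1).toNat = k + 1 := by omega
    rw [this, ht]
  rw [List.foldl_append]
  rw [foldl_if_mul_of_ne (k : Int) _ _ init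
    (fun y hy => by rw [PySem.List.mem_pyRange_one] at hy; omega)]
  rw [h1]
  simp only [List.foldl_cons, ne_eq, not_true_eq_false, if_false]
  rw [foldl_if_mul_of_ne (k : Int) _ _ _
    (fun y hy => by rw [PySem.List.mem_pyRange_one] at hy; omega)]
  rw [h2]

theorem A_eq (tfracts : List (List Int)) :
    hardcore_fractions tfracts
      = [((List.range tfracts.length).map (fun k =>
            (tfracts.map (fun l => PySem.List.pyGetD l 0 0)).getD k 0 *
            ((tfracts.map (fun l => PySem.List.pyGetD l 1 0)).take k).prod *
            ((tfracts.map (fun l => PySem.List.pyGetD l 1 0)).drop (k + 1)).prod)).sum,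
         (tfracts.map (fun l => PySem.List.pyGetD l 1 0)).prod] := by
  simp only [hardcore_fractions, PySem.List.foldl_append_singleton_eq_map, List.nil_append]
  set as := tfracts.map (fun l => PySem.List.pyGetD l 0 0) with has
  set bs := tfracts.map (fun l => PySem.List.pyGetD l 1 0) with hbs
  have hlen : tfracts.length = bs.length := by rw [hbs]; simp
  rw [hlen]
  rw [foldl_pair]
  simp only [List.cons.injEq, and_true]
  constructor
  · rw [zero_add]
    rw [PySem.List.pyRange_zero_nat bs.length, List.map_map]
    apply congrArg List.sum
    apply List.map_congr_left
    intro k hkmem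
    have hk : k < bs.length := List.mem_range.mp hkmem
    simp only [Function.comp]
    rw [← PySem.List.pyRange_zero_nat bs.length]
    rw [A_term bs k hk]
    rw [PySem.List.pyGetD_natCast]
  · rw [one_mul, PySem.List.map_pyGetD_pyRange_zero']

theorem B_eq (tfracts : List (List Int)) :
    hardcore_fractions_alt tfracts
      = [((List.range tfracts.length).map (fun k =>
            (tfracts.map (fun l => PySem.List.pyGetD l 0 0)).getD k 0 *
            ((tfracts.map (fun l => PySem.List.pyGetD l 1 0)).take k).prod *
            ((tfracts.map (fun l => PySem.List.pyGetD l 1 0)).drop (k + 1)).prod)).sum,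
         (tfracts.map (fun l => PySem.List.pyGetD l 1 0)).prod] := by
  simp only [hardcore_fractions_alt, PySem.List.slice_from_one]
  set as := tfracts.map (fun l => PySem.List.pyGetD l 0 0) with has
  set bs := tfracts.map (fun l => PySem.List.pyGetD l 1 0) with hbs
  have hlenas : as.length = tfracts.length := by rw [has]; simp
  have hlenbs : bs.length = tfracts.length := by rw [hbs]; simp
  rw [foldl_scan bs [1] (by simp), foldl_scan bs.reverse [1] (by simp)]
  simp only [List.getLast_singleton, List.singleton_append]
  simp only [List.cons.injEq, and_true]
  constructor
  case _ =>
    rw [zip3_map as (1 :: scanMul 1 bs) ((1 :: scanMul 1 bs.reverse).reverse).tail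
      (by simp [length_scanMul]; omega) (by simp [length_scanMul]; omega)]
    rw [hlenas]
    apply congrArg List.sum
    apply List.map_congr_left
    intro k hkmem
    have hk : k < tfracts.length := List.mem_range.mp hkmem
    rw [pre_getD bs k (by omega), tail_getD, suf_getD bs (k + 1) (by omega)]
  case _ =>
    rw [PySem.List.pyGetD_neg_one _ _ (by simp)]
    rw [pre_getLast bs]

-- ===== VERDICT (by name: the statement is the Claim_ definition above) =====
theorem hardcore_fractions_spec : Claim_equal_hardcore_fractions := by
  intro tfracts _ _
  unfold Spec_hardcore_fractions
  rw [A_eq, B_eq]
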